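-- pv_equiv track=rewrite | github.com/RangDigitech/Validate_Email | main.py | compute_char_stats
-- ===== SOURCE A (Python) =====
-- def compute_char_stats(local_part: str):
--     nums = sum(c.isdigit() for c in local_part)
--     alphas = sum(c.isalpha() for c in local_part)
--     # "Unicode symbols" = characters that are not alnum and not ASCII punctuation/underscore
--     # This is a pragmatic definition; adjust if you track a different meaning.
--     unicode_syms = 0
--     for c in local_part:
--         if c.isalnum() or c in "._-+":
--             continue
--         # count anything else that isn't a space as a symbol
--         if not c.isspace():
--             unicode_syms += 1
--     return nums, alphas, unicode_syms
-- ===== SOURCE B (Python) =====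
-- def _classify(c):
--     # each character falls into exactly one bucket
--     if c.isdigit():
--         return 'd'
--     if c.isalpha():
--         return 'a'
--     if c in "._-+" or c.isspace():
--         return 'o'
--     return 's'
--
--
-- def compute_char_stats(local_part: str):
--     tally = {}
--     for c in local_part:
--         k = _classify(c)
--         tally[k] = tally.get(k, 0) + 1
--     return tally.get('d', 0), tally.get('a', 0), tally.get('s', 0)
-- ===== Notes on version B (the rewrite author's own statement) =====
-- stated objective: alternative
-- what changed: Instead of three predicate-driven passes, B maps every character into one of four mutually exclusive buckets with a classification function and tallies them in a Counter-style dict, reading the three requested counts out at the end; correctness rests on the buckets being disjoint for the characters counted.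
import Mathlib
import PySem

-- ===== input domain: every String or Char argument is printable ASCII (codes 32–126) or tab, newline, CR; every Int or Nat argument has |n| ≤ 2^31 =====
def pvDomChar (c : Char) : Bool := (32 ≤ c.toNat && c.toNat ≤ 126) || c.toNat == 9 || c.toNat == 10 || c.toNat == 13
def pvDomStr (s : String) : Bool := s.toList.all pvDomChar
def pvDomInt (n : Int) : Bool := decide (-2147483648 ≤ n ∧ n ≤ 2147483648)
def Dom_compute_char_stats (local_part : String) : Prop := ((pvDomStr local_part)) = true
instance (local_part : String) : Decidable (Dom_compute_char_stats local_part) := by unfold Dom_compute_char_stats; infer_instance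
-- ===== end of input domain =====

-- B replaces A's three predicate passes by a classification function into four disjoint
-- buckets tallied in a Counter-style dict (alternative decomposition, same cost).

-- ===== PORT A =====
-- the third loop of A: continue on alnum/'._-+', else count non-space
def pvAUnicodeLoop (cs : List Char) : Int :=
  cs.foldl (fun acc c =>
    if PySem.Chars.isalnum c || (c == '.' || c == '_' || c == '-' || c == '+') then acc
    else if !PySem.Chars.isspace c then acc + 1 else acc) 0

def compute_char_stats (local_part : String) : Int × Int × Int :=
  let nums : Int := (local_part.toList.map (fun c => if PySem.Chars.isdigit c then (1:Int) else 0)).sum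
  let alphas : Int := (local_part.toList.map (fun c => if PySem.Chars.isalpha c then (1:Int) else 0)).sum
  let unicode_syms : Int := pvAUnicodeLoop local_part.toList
  (nums, alphas, unicode_syms)

-- ===== PORT B =====
def pvClassify (c : Char) : String :=
  if PySem.Chars.isdigit c then "d"
  else if PySem.Chars.isalpha c then "a"
  else if (c == '.' || c == '_' || c == '-' || c == '+') || PySem.Chars.isspace c then "o"
  else "s"

def compute_char_stats_alt (local_part : String) : Int × Int × Int :=
  let tally := local_part.toList.foldl
    (fun (d : PySem.Dict String Int) c =>
      let k := pvClassify c
      d.insert k (d.getD k 0 + 1)) PySem.Dict.empty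
  (tally.getD "d" 0, tally.getD "a" 0, tally.getD "s" 0)

-- ===== PRECONDITION & SPEC =====
def Spec_compute_char_stats (local_part : String) (out : Int × Int × Int) : Prop := out = compute_char_stats_alt local_part
instance (local_part : String) (out : Int × Int × Int) : Decidable (Spec_compute_char_stats local_part out) := by unfold Spec_compute_char_stats; infer_instance

-- ===== CLAIM =====
def Claim_equal_compute_char_stats : Prop := ∀ (local_part : String), Dom_compute_char_stats local_part → Spec_compute_char_stats local_part (compute_char_stats local_part)

-- ===== LEMMAS AND PROOFS =====

-- B's tally is the Counter of the classified characters, so each output component is a count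
theorem pv_alt_eq_counts (s : String) :
    compute_char_stats_alt s =
      (((s.toList.map pvClassify).count "d" : Int),
       ((s.toList.map pvClassify).count "a" : Int),
       ((s.toList.map pvClassify).count "s" : Int)) := by
  unfold compute_char_stats_alt
  have h : s.toList.foldl
      (fun (d : PySem.Dict String Int) c =>
        let k := pvClassify c
        d.insert k (d.getD k 0 + 1)) PySem.Dict.empty
      = PySem.Dict.counter (s.toList.map pvClassify) := by
    rw [← PySem.Dict.foldl_insert_getD_add_one_eq_counter, List.foldl_map]
  simp only [h, PySem.Dict.getD_counter]

-- the classification agrees pointwise with A's three predicates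
theorem pv_digit_not_alpha (c : Char) : PySem.Chars.isdigit c = true → PySem.Chars.isalpha c = false := by
  simp [PySem.Chars.isdigit, PySem.Chars.isalpha, PySem.Chars.isupper, PySem.Chars.islower,
    Char.le_def, UInt32.le_iff_toNat_le]
  intro h1 h2
  omega

theorem pv_classify_d (c : Char) :
    ((pvClassify c == "d") = PySem.Chars.isdigit c) := by
  unfold pvClassify
  split_ifs <;> simp_all

theorem pv_classify_a (c : Char) :
    ((pvClassify c == "a") = PySem.Chars.isalpha c) := by
  unfold pvClassify
  by_cases h1 : PySem.Chars.isdigit c = true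
  · simp [h1, pv_digit_not_alpha c h1]
  · simp only [h1]
    split_ifs <;> simp_all

theorem pv_classify_s (c : Char) :
    ((pvClassify c == "s")
      = (!(PySem.Chars.isalnum c || (c == '.' || c == '_' || c == '-' || c == '+'))
          && !PySem.Chars.isspace c)) := by
  unfold pvClassify PySem.Chars.isalnum
  split_ifs <;> simp_all
  tauto

theorem pv_aloop_eq_countP (cs : List Char) :
    pvAUnicodeLoop cs =
      (cs.countP (fun c =>
        !(PySem.Chars.isalnum c || (c == '.' || c == '_' || c == '-' || c == '+'))
          && !PySem.Chars.isspace c) : Int) := by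
  unfold pvAUnicodeLoop
  have hfun : (fun (acc : Int) c =>
      if PySem.Chars.isalnum c || (c == '.' || c == '_' || c == '-' || c == '+') then acc
      else if !PySem.Chars.isspace c then acc + 1 else acc)
      = (fun (acc : Int) c =>
        if (!(PySem.Chars.isalnum c || (c == '.' || c == '_' || c == '-' || c == '+'))
            && !PySem.Chars.isspace c) then acc + 1 else acc) := by
    funext acc c
    split_ifs <;> simp_all
  rw [hfun, PySem.List.foldl_count_if]
  simp

theorem compute_char_stats_spec : Claim_equal_compute_char_stats := by
  intro s _
  unfold Spec_compute_char_stats compute_char_stats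
  rw [pv_alt_eq_counts, pv_aloop_eq_countP,
    PySem.List.sum_map_ite_one_zero, PySem.List.sum_map_ite_one_zero]
  have hc : ∀ (k : String) (p : Char → Bool), (∀ c, (pvClassify c == k) = p c) →
      (s.toList.map pvClassify).count k = s.toList.countP p := by
    intro k p hp
    rw [List.count_eq_countP, List.countP_map]
    exact List.countP_congr (fun c _ => by simp [Function.comp, hp c])
  refine Prod.ext ?_ (Prod.ext ?_ ?_) <;> simp only
  · rw [hc "d" _ pv_classify_d]
  · rw [hc "a" _ pv_classify_a]
  · rw [hc "s" _ pv_classify_s]
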